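-- pv_equiv track=rewrite | github.com/ericleigh007/OmniChat | tools/vision/process_media.py | _detect_format
-- ===== SOURCE A (Python) =====
-- def _detect_format(text: str) -> str:
--     """
--     Auto-detect the best output format based on content structure.
--
--     Returns:
--         'excel' — if the text looks like a table (rows of pipe-delimited or tab-delimited data)
--         'markdown' — if the text has markdown headings, lists, or code blocks
--         'text' — plain text fallback
--     """
--     lines = text.strip().splitlines()
--
--     # Check for table patterns (pipe-delimited markdown tables)
--     pipe_lines = sum(1 for line in lines if line.count("|") >= 2)
--     if pipe_lines >= 3:
--         return "excel"
--
--     # Check for tab-delimited tables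
--     tab_lines = sum(1 for line in lines if line.count("\t") >= 2)
--     if tab_lines >= 3:
--         return "excel"
--
--     # Check for markdown features
--     md_indicators = 0
--     for line in lines:
--         stripped = line.strip()
--         if stripped.startswith("#"):
--             md_indicators += 1
--         elif stripped.startswith(("- ", "* ", "1. ", "```")):
--             md_indicators += 1
--         elif stripped.startswith("> "):
--             md_indicators += 1
--
--     if md_indicators >= 2:
--         return "markdown"
--
--     return "text"
-- ===== SOURCE B (Python) =====
-- _MD_PREFIXES = ("#", "- ", "* ", "1. ", "```", "> ")
--
--
-- def _detect_format(text: str) -> str: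
--     """Streaming scan with early termination: walk the lines once, and the
--     moment either delimiter counter crosses its table threshold, return
--     'excel' without reading the rest.  Only if no table is ever detected
--     does the markdown-indicator tally (carried along) decide the answer.
--
--     Correct because the counters are monotone: if a full scan would find
--     >=3 pipe rows or >=3 tab rows (A's 'excel' cases, in either order both
--     give 'excel'), the streaming counter crosses 3 at some prefix and vice
--     versa; otherwise all lines are seen and the markdown tally is total."""
--     pipes = tabs = md = 0
--     for line in text.strip().splitlines():
--         if line.count("|") >= 2:
--             pipes += 1
--             if pipes == 3:
--                 return "excel"
--         if line.count("\t") >= 2: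
--             tabs += 1
--             if tabs == 3:
--                 return "excel"
--         if line.strip().startswith(_MD_PREFIXES):
--             md += 1
--     return "markdown" if md >= 2 else "text"
-- ===== Notes on version B (the rewrite author's own statement) =====
-- stated objective: alternative
-- what changed: Replaces A's three staged full passes (two generator sums, then an if/elif counting loop, each followed by a threshold test) with a streaming single scan that short-circuits with the table verdict the moment a delimiter counter crosses its threshold, never reading the remaining lines; only when no table is detected does the carried markdown tally decide, its if/elif cascade collapsed into one tuple-startswith test.
import Mathlib
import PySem

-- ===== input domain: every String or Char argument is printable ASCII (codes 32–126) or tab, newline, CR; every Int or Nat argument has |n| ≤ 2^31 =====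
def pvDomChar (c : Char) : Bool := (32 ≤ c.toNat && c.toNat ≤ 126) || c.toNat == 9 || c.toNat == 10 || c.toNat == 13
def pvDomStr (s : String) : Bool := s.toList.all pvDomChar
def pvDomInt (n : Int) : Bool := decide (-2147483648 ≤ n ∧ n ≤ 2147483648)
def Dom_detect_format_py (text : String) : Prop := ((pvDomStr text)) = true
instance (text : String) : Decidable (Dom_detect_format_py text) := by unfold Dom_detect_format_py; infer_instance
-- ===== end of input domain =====

-- B replaces A's three staged full passes with one streaming scan that returns 'excel' as soon
-- as a delimiter counter crosses its threshold; same return value, proved equal below.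

-- ===== PORT A =====
def detect_format_py (text : String) : String :=
  let lines := PySem.Str.splitlines (PySem.Str.strip text)
  let pipe_lines : Int := lines.foldl
    (fun acc line => if PySem.Str.count line "|" ≥ 2 then acc + 1 else acc) 0
  if pipe_lines ≥ 3 then "excel" else
  let tab_lines : Int := lines.foldl
    (fun acc line => if PySem.Str.count line "\t" ≥ 2 then acc + 1 else acc) 0
  if tab_lines ≥ 3 then "excel" else
  let md_indicators : Int := lines.foldl
    (fun acc line =>
      let stripped := PySem.Str.strip line
      if PySem.Str.startswith stripped "#" then acc + 1
      else if PySem.Str.startswith stripped "- " || PySem.Str.startswith stripped "* " ||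
              PySem.Str.startswith stripped "1. " || PySem.Str.startswith stripped "```" then acc + 1
      else if PySem.Str.startswith stripped "> " then acc + 1
      else acc) 0
  if md_indicators ≥ 2 then "markdown" else "text"

-- ===== PORT B =====
-- Source B's per-line markdown test: one tuple-startswith over the six prefixes _MD_PREFIXES
def pvIsMd (line : String) : Bool :=
  PySem.Str.startswith (PySem.Str.strip line) "#" || PySem.Str.startswith (PySem.Str.strip line) "- " ||
  PySem.Str.startswith (PySem.Str.strip line) "* " || PySem.Str.startswith (PySem.Str.strip line) "1. " ||
  PySem.Str.startswith (PySem.Str.strip line) "```" || PySem.Str.startswith (PySem.Str.strip line) "> "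

-- Source B's streaming loop: `cont` is the rest of the loop body after the pipe check
def pvScan : List String → Int → Int → Int → String
  | [], _, _, md => if md ≥ 2 then "markdown" else "text"
  | line :: rest, pipes, tabs, md =>
    let cont : Int → String := fun pipes =>
      let md' := if pvIsMd line then md + 1 else md
      if PySem.Str.count line "\t" ≥ 2 then
        if tabs + 1 = 3 then "excel" else pvScan rest pipes (tabs + 1) md'
      else pvScan rest pipes tabs md'
    if PySem.Str.count line "|" ≥ 2 then
      if pipes + 1 = 3 then "excel" else cont (pipes + 1)
    else cont pipes

def detect_format_py_alt (text : String) : String :=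
  pvScan (PySem.Str.splitlines (PySem.Str.strip text)) 0 0 0

-- ===== PRECONDITION & SPEC =====
def Spec_detect_format_py (text : String) (out : String) : Prop := out = detect_format_py_alt text
instance (text : String) (out : String) : Decidable (Spec_detect_format_py text out) := by unfold Spec_detect_format_py; infer_instance

-- ===== CLAIM =====
def Claim_equal_detect_format_py : Prop := ∀ (text : String), Dom_detect_format_py text → Spec_detect_format_py text (detect_format_py text)

-- ===== LEMMAS AND PROOFS =====

def pvP1 (l : String) : Bool := decide (PySem.Str.count l "|" ≥ 2)
def pvP2 (l : String) : Bool := decide (PySem.Str.count l "\t" ≥ 2)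

set_option maxHeartbeats 1000000 in
-- the streaming scan, started below both thresholds, computes A's staged verdict on the totals
theorem pvScan_eq (lines : List String) (pipes tabs md : Int)
    (hp : pipes < 3) (ht : tabs < 3) :
    pvScan lines pipes tabs md =
      if pipes + (lines.countP pvP1 : Int) ≥ 3 then "excel"
      else if tabs + (lines.countP pvP2 : Int) ≥ 3 then "excel"
      else if md + (lines.countP pvIsMd : Int) ≥ 2 then "markdown" else "text" := by
  induction lines generalizing pipes tabs md with
  | nil =>
    simp only [pvScan, List.countP_nil, Nat.cast_zero, add_zero]
    split_ifs <;> first | rfl | omega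
  | cons line rest ih =>
    have e1 : (((line :: rest).countP pvP1 : Nat) : Int)
        = (if pvP1 line then 1 else 0) + (rest.countP pvP1 : Int) := by
      by_cases h : pvP1 line <;> simp [h] <;> push_cast <;> ring
    have e2 : (((line :: rest).countP pvP2 : Nat) : Int)
        = (if pvP2 line then 1 else 0) + (rest.countP pvP2 : Int) := by
      by_cases h : pvP2 line <;> simp [h] <;> push_cast <;> ring
    have e3 : (((line :: rest).countP pvIsMd : Nat) : Int)
        = (if pvIsMd line then 1 else 0) + (rest.countP pvIsMd : Int) := by
      by_cases h : pvIsMd line <;> simp [h] <;> push_cast <;> ring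
    have h1nn : (0:Int) ≤ (rest.countP pvP1 : Int) := Int.natCast_nonneg _
    have h2nn : (0:Int) ≤ (rest.countP pvP2 : Int) := Int.natCast_nonneg _
    have h3nn : (0:Int) ≤ (rest.countP pvIsMd : Int) := Int.natCast_nonneg _
    rw [e1, e2, e3]
    by_cases h1 : PySem.Str.count line "|" ≥ 2 <;>
    by_cases h2 : PySem.Str.count line "\t" ≥ 2 <;>
    by_cases h3 : pvIsMd line <;>
    simp only [pvScan, pvP1, pvP2, h1, h2, h3, decide_true, decide_false, if_true, if_false, Bool.false_eq_true] <;>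
    split_ifs <;>
    first
      | rfl
      | omega
      | (rw [ih _ _ _ (by omega) (by omega)]; split_ifs <;> first | rfl | omega)

-- A's if/elif markdown cascade counts the same lines as Source B's single disjunction pvIsMd
theorem pv_md_body (acc : Int) (line : String) :
    (if PySem.Str.startswith (PySem.Str.strip line) "#" then acc + 1
     else if PySem.Str.startswith (PySem.Str.strip line) "- " || PySem.Str.startswith (PySem.Str.strip line) "* " ||
             PySem.Str.startswith (PySem.Str.strip line) "1. " || PySem.Str.startswith (PySem.Str.strip line) "```" then acc + 1
     else if PySem.Str.startswith (PySem.Str.strip line) "> " then acc + 1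
     else acc)
    = (if pvIsMd line then acc + 1 else acc) := by
  unfold pvIsMd
  generalize PySem.Str.startswith (PySem.Str.strip line) "#" = b1
  generalize PySem.Str.startswith (PySem.Str.strip line) "- " = b2
  generalize PySem.Str.startswith (PySem.Str.strip line) "* " = b3
  generalize PySem.Str.startswith (PySem.Str.strip line) "1. " = b4
  generalize PySem.Str.startswith (PySem.Str.strip line) "```" = b5
  generalize PySem.Str.startswith (PySem.Str.strip line) "> " = b6
  cases b1 <;> cases b2 <;> cases b3 <;> cases b4 <;> cases b5 <;> cases b6 <;> rfl

-- ===== VERDICT =====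
theorem detect_format_py_spec : Claim_equal_detect_format_py := by
  intro text _
  show detect_format_py text = detect_format_py_alt text
  unfold detect_format_py detect_format_py_alt
  simp only []
  rw [pvScan_eq _ 0 0 0 (by omega) (by omega)]
  rw [PySem.List.foldl_congr_mem _ _ (fun acc line => if pvIsMd line then acc + 1 else acc) _
      (fun acc line _ => pv_md_body acc line)]
  rw [PySem.List.foldl_ite_add_one, PySem.List.foldl_ite_add_one, PySem.List.foldl_if_add_one]
  unfold pvP1 pvP2
  simp only [zero_add]
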